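-- pv_equiv track=rewrite | github.com/Kim-Minhee/Baekjoon | 백준/Bronze/9398. A Password Policy Requirement/A Password Policy Requirement.py | shortest_valid_substring_len
-- ===== SOURCE A (Python) =====
-- def shortest_valid_substring_len(s: str) -> int:
--     n = len(s)
--     if n < 6:
--         return 0
--
--     # 카테고리: 0=대문자, 1=소문자, 2=숫자
--     def cat_idx(ch: str) -> int:
--         if 'A' <= ch <= 'Z':
--             return 0
--         elif 'a' <= ch <= 'z':
--             return 1
--         elif '0' <= ch <= '9':
--             return 2
--         return -1  # 문제 조건상 오지 않음
--
--     counts = [0, 0, 0]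
--     left = 0
--     best = float('inf')
--
--     for right, ch in enumerate(s):
--         idx = cat_idx(ch)
--         if idx >= 0:
--             counts[idx] += 1
--
--         # 윈도우가 조건(대/소/숫자 모두 포함 + 길이>=6)을 만족하면 최대한 줄이기
--         while (right - left + 1) >= 6 and all(c > 0 for c in counts):
--             best = min(best, right - left + 1)
--             # 왼쪽을 한 칸 줄여서 더 짧은 해를 시도
--             lidx = cat_idx(s[left])
--             if lidx >= 0:
--                 counts[lidx] -= 1
--             left += 1
--
--     return 0 if best == float('inf') else best
-- ===== SOURCE B (Python) =====
-- def shortest_valid_substring_len(s: str) -> int: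
--     n = len(s)
--     if n < 6:
--         return 0
--     lastU = lastL = lastD = None
--     best = None
--     for right, ch in enumerate(s):
--         if 'A' <= ch <= 'Z':
--             lastU = right
--         elif 'a' <= ch <= 'z':
--             lastL = right
--         elif '0' <= ch <= '9':
--             lastD = right
--         if lastU is not None and lastL is not None and lastD is not None and right >= 5:
--             m = min(lastU, lastL, lastD)
--             cand = max(right - m + 1, 6)
--             if best is None or cand < best:
--                 best = cand
--     return 0 if best is None else best
-- ===== Notes on version B (the rewrite author's own statement) =====
-- stated objective: simpler
-- what changed: Replaces the sliding window with mutable category counts and an inner shrink loop by a single pass that only remembers the last index of each of the three character classes and takes best = min over right of max(right - min(lastU,lastL,lastD) + 1, 6).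
import Mathlib
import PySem

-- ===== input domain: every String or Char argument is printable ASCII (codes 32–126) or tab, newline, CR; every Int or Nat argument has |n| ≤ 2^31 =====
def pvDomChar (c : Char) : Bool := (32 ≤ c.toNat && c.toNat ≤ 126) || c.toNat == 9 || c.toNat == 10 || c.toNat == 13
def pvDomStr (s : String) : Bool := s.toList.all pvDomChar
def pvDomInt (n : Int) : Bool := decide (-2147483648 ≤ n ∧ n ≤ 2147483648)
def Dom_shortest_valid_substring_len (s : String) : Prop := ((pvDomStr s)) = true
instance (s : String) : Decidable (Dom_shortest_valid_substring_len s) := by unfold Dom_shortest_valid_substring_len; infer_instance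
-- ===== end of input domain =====

-- B replaces A's sliding window (mutable counts + inner shrink loop) by a single pass that
-- remembers only the last index of each character class; objective: simpler. Same return value.

-- ===== PORT A =====

-- cat_idx: 0 = uppercase, 1 = lowercase, 2 = digit, -1 otherwise
def catIdx (ch : Char) : Int :=
  if 'A' ≤ ch ∧ ch ≤ 'Z' then 0
  else if 'a' ≤ ch ∧ ch ≤ 'z' then 1
  else if '0' ≤ ch ∧ ch ≤ '9' then 2
  else -1

-- counts[i] += d for the three-element counts list, guarded by the caller's idx ≥ 0
def pvBump (i d : Int) (c : Int × Int × Int) : Int × Int × Int :=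
  if i = 0 then (c.1 + d, c.2.1, c.2.2)
  else if i = 1 then (c.1, c.2.1 + d, c.2.2)
  else if i = 2 then (c.1, c.2.1, c.2.2 + d)
  else c

-- best = min(best, v) where none plays float('inf')
def pvMinOpt (best : Option Int) (v : Int) : Option Int :=
  match best with
  | none => some v
  | some b => some (min b v)

-- the inner `while (right - left + 1) >= 6 and all(c > 0 for c in counts)` loop
def pvShrink (cs : List Char) (right left : Nat) (c : Int × Int × Int)
    (best : Option Int) : Nat × (Int × Int × Int) × Option Int :=
  if h : right + 1 - left ≥ 6 ∧ c.1 > 0 ∧ c.2.1 > 0 ∧ c.2.2 > 0 then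
    let best' := pvMinOpt best ((right : Int) - (left : Int) + 1)
    let lidx := catIdx (cs.getD left ' ')
    let c' := if lidx ≥ 0 then pvBump lidx (-1) c else c
    pvShrink cs right (left + 1) c' best'
  else (left, c, best)
  termination_by right + 1 - left
  decreasing_by omega

-- the outer `for right, ch in enumerate(s)` loop, right carried as a counter
def pvLoopA (cs rem : List Char) (right left : Nat) (c : Int × Int × Int)
    (best : Option Int) : Nat × (Int × Int × Int) × Option Int :=
  match rem with
  | [] => (left, c, best)
  | ch :: rest =>
    let idx := catIdx ch
    let c1 := if idx ≥ 0 then pvBump idx 1 c else c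
    let r := pvShrink cs right left c1 best
    pvLoopA cs rest (right + 1) r.1 r.2.1 r.2.2

def shortest_valid_substring_len (s : String) : Int :=
  let cs := s.toList
  let n := cs.length
  if n < 6 then 0
  else
    match (pvLoopA cs cs 0 0 (0, 0, 0) none).2.2 with
    | none => 0
    | some b => b

-- ===== PORT B =====

-- `if lastU is not None and lastL is not None and lastD is not None and right >= 5: ...`
def pvBestUpd (right : Nat) (lU lL lD : Option Nat) (best : Option Int) : Option Int :=
  match lU, lL, lD with
  | some u, some l, some d =>
    if right ≥ 5 then
      let m := min u (min l d)
      let cand := max ((right : Int) - (m : Int) + 1) 6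
      match best with
      | none => some cand
      | some b => if cand < b then some cand else some b
    else best
  | _, _, _ => best

-- single pass: last index of each class, candidate max(right - min(last) + 1, 6)
def pvLoopB (rem : List Char) (right : Nat) (lU lL lD : Option Nat)
    (best : Option Int) : Option Int :=
  match rem with
  | [] => best
  | ch :: rest =>
    let st :=
      if 'A' ≤ ch ∧ ch ≤ 'Z' then (some right, lL, lD)
      else if 'a' ≤ ch ∧ ch ≤ 'z' then (lU, some right, lD)
      else if '0' ≤ ch ∧ ch ≤ '9' then (lU, lL, some right)
      else (lU, lL, lD)
    let best' := pvBestUpd right st.1 st.2.1 st.2.2 best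
    pvLoopB rest (right + 1) st.1 st.2.1 st.2.2 best'

def shortest_valid_substring_len_alt (s : String) : Int :=
  let cs := s.toList
  if cs.length < 6 then 0
  else
    match pvLoopB cs 0 none none none none with
    | none => 0
    | some b => b

-- ===== PRECONDITION & SPEC =====
def Spec_shortest_valid_substring_len (s : String) (out : Int) : Prop := out = shortest_valid_substring_len_alt s
instance (s : String) (out : Int) : Decidable (Spec_shortest_valid_substring_len s out) := by unfold Spec_shortest_valid_substring_len; infer_instance

-- ===== CLAIM (what is proved, stated in full; the proofs are below) =====
def Claim_equal_shortest_valid_substring_len : Prop := ∀ (s : String), Dom_shortest_valid_substring_len s → Spec_shortest_valid_substring_len s (shortest_valid_substring_len s)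

-- ===== LEMMAS AND PROOFS =====

def isUb (c : Char) : Bool := decide ('A' ≤ c ∧ c ≤ 'Z')
def isLb (c : Char) : Bool := decide ('a' ≤ c ∧ c ≤ 'z')
def isDb (c : Char) : Bool := decide ('0' ≤ c ∧ c ≤ '9')

-- the three category counts of a list, as Ints
def cnts (p : List Char) : Int × Int × Int :=
  ((p.countP isUb : Int), (p.countP isLb : Int), (p.countP isDb : Int))

def lastOccFrom (f : Char → Bool) : Nat → List Char → Option Nat → Option Nat
  | _, [], acc => acc
  | i, c :: rest, acc => lastOccFrom f (i + 1) rest (if f c then some i else acc)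

-- index of the last character satisfying f
def lastOcc (f : Char → Bool) (p : List Char) : Option Nat := lastOccFrom f 0 p none

-- the three character classes are mutually exclusive and match catIdx
lemma notUL (ch : Char) : 'A' ≤ ch ∧ ch ≤ 'Z' → 'a' ≤ ch ∧ ch ≤ 'z' → False := by
  simp [Char.le_def, UInt32.le_iff_toNat_le]; omega

lemma notUD (ch : Char) : 'A' ≤ ch ∧ ch ≤ 'Z' → '0' ≤ ch ∧ ch ≤ '9' → False := by
  simp [Char.le_def, UInt32.le_iff_toNat_le]; omega

lemma notLD (ch : Char) : 'a' ≤ ch ∧ ch ≤ 'z' → '0' ≤ ch ∧ ch ≤ '9' → False := by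
  simp [Char.le_def, UInt32.le_iff_toNat_le]; omega

lemma char_tri (ch : Char) :
    (isUb ch = true ∧ isLb ch = false ∧ isDb ch = false ∧ catIdx ch = 0) ∨
    (isUb ch = false ∧ isLb ch = true ∧ isDb ch = false ∧ catIdx ch = 1) ∨
    (isUb ch = false ∧ isLb ch = false ∧ isDb ch = true ∧ catIdx ch = 2) ∨
    (isUb ch = false ∧ isLb ch = false ∧ isDb ch = false ∧ catIdx ch = -1) := by
  by_cases hU : ('A' ≤ ch ∧ ch ≤ 'Z')
  · exact Or.inl ⟨by simp [isUb, hU], by simp [isLb]; exact fun a => not_le.mp fun b => notUL ch hU ⟨a, b⟩,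
      by simp [isDb]; exact fun a => not_le.mp fun b => notUD ch hU ⟨a, b⟩, by simp [catIdx, hU]⟩
  · by_cases hL : ('a' ≤ ch ∧ ch ≤ 'z')
    · exact Or.inr (Or.inl ⟨by simp [isUb, hU], by simp [isLb, hL],
        by simp [isDb]; exact fun a => not_le.mp fun b => notLD ch hL ⟨a, b⟩, by simp [catIdx, hU, hL]⟩)
    · by_cases hD : ('0' ≤ ch ∧ ch ≤ '9')
      · exact Or.inr (Or.inr (Or.inl ⟨by simp [isUb, hU], by simp [isLb, hL],
          by simp [isDb, hD], by simp [catIdx, hU, hL, hD]⟩))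
      · exact Or.inr (Or.inr (Or.inr ⟨by simp [isUb, hU], by simp [isLb, hL],
          by simp [isDb, hD], by simp [catIdx, hU, hL, hD]⟩))

lemma bump_cnts (ch : Char) (X : List Char) :
    (if catIdx ch ≥ 0 then pvBump (catIdx ch) 1 (cnts X) else cnts X) = cnts (X ++ [ch]) := by
  rcases char_tri ch with ⟨h1, h2, h3, h4⟩ | ⟨h1, h2, h3, h4⟩ | ⟨h1, h2, h3, h4⟩ | ⟨h1, h2, h3, h4⟩ <;>
    simp [cnts, pvBump, h1, h2, h3, h4, List.countP_append, List.countP_cons]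

lemma bump_cnts_dec (ch : Char) (X : List Char) :
    (if catIdx ch ≥ 0 then pvBump (catIdx ch) (-1) (cnts (ch :: X)) else cnts (ch :: X)) = cnts X := by
  rcases char_tri ch with ⟨h1, h2, h3, h4⟩ | ⟨h1, h2, h3, h4⟩ | ⟨h1, h2, h3, h4⟩ | ⟨h1, h2, h3, h4⟩ <;>
    simp [cnts, pvBump, h1, h2, h3, h4, List.countP_cons]

lemma lastOccFrom_append (f : Char → Bool) (c : Char) :
    ∀ (p : List Char) (i : Nat) (acc : Option Nat),
    lastOccFrom f i (p ++ [c]) acc = if f c then some (i + p.length) else lastOccFrom f i p acc := by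
  intro p
  induction p with
  | nil => intro i acc; simp [lastOccFrom]
  | cons x p ih =>
    intro i acc
    simp only [List.cons_append, lastOccFrom, ih]
    split <;> simp <;> omega

lemma lastOcc_append (f : Char → Bool) (p : List Char) (c : Char) :
    lastOcc f (p ++ [c]) = if f c then some p.length else lastOcc f p := by
  simp [lastOcc, lastOccFrom_append]

lemma lastOccFrom_bound (f : Char → Bool) :
    ∀ (p : List Char) (i : Nat) (acc : Option Nat),
    lastOccFrom f i p acc = acc ∨
      ∃ j, lastOccFrom f i p acc = some j ∧ i ≤ j ∧ j < i + p.length := by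
  intro p
  induction p with
  | nil => intro i acc; exact Or.inl rfl
  | cons x p ih =>
    intro i acc
    by_cases hx : f x
    · rcases ih (i + 1) (some i) with h | ⟨j, hj, h1, h2⟩
      · right; exact ⟨i, by simp [lastOccFrom, hx, h], le_refl i, by simp⟩
      · right; exact ⟨j, by simp [lastOccFrom, hx, hj], by omega, by simp; omega⟩
    · rcases ih (i + 1) acc with h | ⟨j, hj, h1, h2⟩
      · left; simp [lastOccFrom, hx, h]
      · right; exact ⟨j, by simp [lastOccFrom, hx, hj], by omega, by simp; omega⟩

lemma lastOcc_lt (f : Char → Bool) (p : List Char) (j : Nat)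
    (h : lastOcc f p = some j) : j < p.length := by
  rcases lastOccFrom_bound f p 0 none with h0 | ⟨j', hj', _, h2⟩
  · rw [lastOcc] at h; rw [h0] at h; exact absurd h (by simp)
  · rw [lastOcc] at h; rw [hj'] at h; injection h with h; omega

-- positive category count in the suffix from L ↔ last occurrence at index ≥ L
lemma count_pos_iff (f : Char → Bool) :
    ∀ (p : List Char) (L : Nat), L ≤ p.length →
    (0 < (p.drop L).countP f ↔ ∃ i, lastOcc f p = some i ∧ L ≤ i) := by
  intro p
  induction p using List.reverseRecOn with
  | nil =>
    intro L hL
    have hL0 : L = 0 := Nat.le_zero.mp (by simpa using hL)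
    subst hL0; simp [lastOcc, lastOccFrom]
  | append_singleton p c ih =>
    intro L hL
    simp only [List.length_append, List.length_singleton] at hL
    rw [List.drop_append, List.countP_append, lastOcc_append]
    by_cases hL' : L ≤ p.length
    · have h0 : L - p.length = 0 := by omega
      rw [h0]
      by_cases hc : f c
      · simp only [hc, if_pos]
        constructor
        · intro _; exact ⟨p.length, rfl, hL'⟩
        · intro _; simp [List.countP_cons, hc]
      · simp only [hc, if_neg, Bool.false_eq_true, not_false_iff]
        rw [show ([c].drop 0).countP f = 0 by simp [List.countP_cons, hc]]
        simpa using ih L hL'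
    · have hLp : L = p.length + 1 := by omega
      subst hLp
      rw [List.drop_of_length_le (by omega), show p.length + 1 - p.length = 1 by omega]
      simp only [List.drop_succ_cons, List.drop_nil, List.countP_nil, add_zero, Nat.lt_irrefl,
        false_iff]
      rintro ⟨i, hi, hle⟩
      by_cases hc : f c
      · rw [if_pos hc] at hi; injection hi with hi; omega
      · rw [if_neg (by simp [hc])] at hi; have := lastOcc_lt f p i hi; omega

lemma pvMinOpt_absorb (b : Option Int) (x y : Int) (h : y ≤ x) :
    pvMinOpt (pvMinOpt b x) y = pvMinOpt b y := by
  cases b <;> simp [pvMinOpt] <;> omega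

-- one unfold of the while loop, both branches
lemma pvShrink_step (cs : List Char) (right L : Nat) (c : Int × Int × Int) (best : Option Int)
    (h : right + 1 - L ≥ 6 ∧ c.1 > 0 ∧ c.2.1 > 0 ∧ c.2.2 > 0) :
    pvShrink cs right L c best =
      pvShrink cs right (L + 1)
        (if catIdx (cs.getD L ' ') ≥ 0 then pvBump (catIdx (cs.getD L ' ')) (-1) c else c)
        (pvMinOpt best ((right : Int) - (L : Int) + 1)) := by
  rw [pvShrink, dif_pos h]

lemma pvShrink_stop (cs : List Char) (right L : Nat) (c : Int × Int × Int) (best : Option Int)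
    (h : ¬(right + 1 - L ≥ 6 ∧ c.1 > 0 ∧ c.2.1 > 0 ∧ c.2.2 > 0)) :
    pvShrink cs right L c best = (L, c, best) := by
  rw [pvShrink, dif_neg h]

-- the shrink loop, when it runs, lands at left = M + 1 and records right - M + 1
lemma pvShrink_run (cs p : List Char) (right : Nat) (u l d : Nat)
    (hcs : ∃ rest, cs = p ++ rest) (hp : p.length = right + 1)
    (hu : lastOcc isUb p = some u) (hl : lastOcc isLb p = some l) (hd : lastOcc isDb p = some d)
    (hr : 5 ≤ right) :
    ∀ (L : Nat) (bA : Option Int), L ≤ min (min u (min l d)) (right - 5) →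
    pvShrink cs right L (cnts (p.drop L)) bA =
      (min (min u (min l d)) (right - 5) + 1,
       cnts (p.drop (min (min u (min l d)) (right - 5) + 1)),
       pvMinOpt bA ((right : Int) - ((min (min u (min l d)) (right - 5) : Nat) : Int) + 1)) := by
  have hul := lastOcc_lt _ _ _ hu
  have hll := lastOcc_lt _ _ _ hl
  have hdl := lastOcc_lt _ _ _ hd
  set M := min (min u (min l d)) (right - 5) with hM
  suffices key : ∀ n L bA, M - L = n → L ≤ M →
      pvShrink cs right L (cnts (p.drop L)) bA =
        (M + 1, cnts (p.drop (M + 1)), pvMinOpt bA ((right : Int) - (M : Int) + 1)) by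
    intro L bA hLM
    exact key (M - L) L bA rfl hLM
  have step : ∀ L bA, L ≤ M →
      pvShrink cs right L (cnts (p.drop L)) bA =
        pvShrink cs right (L + 1) (cnts (p.drop (L + 1)))
          (pvMinOpt bA ((right : Int) - (L : Int) + 1)) := by
    intro L bA hLM
    have hLlt : L < p.length := by omega
    have hcond : right + 1 - L ≥ 6 ∧ (cnts (p.drop L)).1 > 0 ∧ (cnts (p.drop L)).2.1 > 0 ∧
        (cnts (p.drop L)).2.2 > 0 := by
      refine ⟨by omega, ?_, ?_, ?_⟩
      · have := (count_pos_iff isUb p L (by omega)).mpr ⟨u, hu, by omega⟩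
        simp only [cnts]; exact_mod_cast this
      · have := (count_pos_iff isLb p L (by omega)).mpr ⟨l, hl, by omega⟩
        simp only [cnts]; exact_mod_cast this
      · have := (count_pos_iff isDb p L (by omega)).mpr ⟨d, hd, by omega⟩
        simp only [cnts]; exact_mod_cast this
    rw [pvShrink_step cs right L _ bA hcond]
    have hch : cs.getD L ' ' = p.getD L ' ' := by
      obtain ⟨rest, rfl⟩ := hcs; exact List.getD_append p rest ' ' L hLlt
    have hget : p.getD L ' ' = p[L] := List.getD_eq_getElem p ' ' hLlt
    have hdropL : p.drop L = p[L] :: p.drop (L + 1) := List.drop_eq_getElem_cons hLlt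
    rw [hch, hget, hdropL, bump_cnts_dec]
  intro n
  induction n with
  | zero =>
    intro L bA hn hLM
    have hLM0 : L = M := by omega
    rw [step L bA hLM, hLM0]
    refine pvShrink_stop cs right (M + 1) _ _ ?_
    rintro ⟨h6, h1, h2, h3⟩
    by_cases hm : min u (min l d) ≤ right - 5
    · have hmv : min u (min l d) = u ∨ min u (min l d) = l ∨ min u (min l d) = d := by omega
      rcases hmv with hv | hv | hv
      · have hpos : 0 < (p.drop (M + 1)).countP isUb := by
          simp only [cnts] at h1; exact_mod_cast h1
        obtain ⟨i, hi, hLi⟩ := (count_pos_iff isUb p (M + 1) (by omega)).mp hpos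
        rw [hu] at hi; injection hi with hi; omega
      · have hpos : 0 < (p.drop (M + 1)).countP isLb := by
          simp only [cnts] at h2; exact_mod_cast h2
        obtain ⟨i, hi, hLi⟩ := (count_pos_iff isLb p (M + 1) (by omega)).mp hpos
        rw [hl] at hi; injection hi with hi; omega
      · have hpos : 0 < (p.drop (M + 1)).countP isDb := by
          simp only [cnts] at h3; exact_mod_cast h3
        obtain ⟨i, hi, hLi⟩ := (count_pos_iff isDb p (M + 1) (by omega)).mp hpos
        rw [hd] at hi; injection hi with hi; omega
    · omega
  | succ n ih =>
    intro L bA hn hLM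
    rw [step L bA hLM, ih (L + 1) _ (by omega) (by omega),
      pvMinOpt_absorb bA _ _ (by omega)]

-- B's last-index update computes lastOcc of the extended prefix
lemma last_step (p : List Char) (ch : Char) :
    (if 'A' ≤ ch ∧ ch ≤ 'Z' then (some p.length, lastOcc isLb p, lastOcc isDb p)
     else if 'a' ≤ ch ∧ ch ≤ 'z' then (lastOcc isUb p, some p.length, lastOcc isDb p)
     else if '0' ≤ ch ∧ ch ≤ '9' then (lastOcc isUb p, lastOcc isLb p, some p.length)
     else (lastOcc isUb p, lastOcc isLb p, lastOcc isDb p))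
    = (lastOcc isUb (p ++ [ch]), lastOcc isLb (p ++ [ch]), lastOcc isDb (p ++ [ch])) := by
  rcases char_tri ch with ⟨h1, h2, h3, -⟩ | ⟨h1, h2, h3, -⟩ | ⟨h1, h2, h3, -⟩ | ⟨h1, h2, h3, -⟩
  · have hP1 : ('A' ≤ ch ∧ ch ≤ 'Z') := by simpa [isUb] using h1
    rw [if_pos hP1, lastOcc_append, lastOcc_append, lastOcc_append, h1, h2, h3]; simp
  · have hP1 : ¬('A' ≤ ch ∧ ch ≤ 'Z') := by intro hP; simp [isUb, hP] at h1
    have hP2 : ('a' ≤ ch ∧ ch ≤ 'z') := by simpa [isLb] using h2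
    rw [if_neg hP1, if_pos hP2, lastOcc_append, lastOcc_append, lastOcc_append, h1, h2, h3]
    simp
  · have hP1 : ¬('A' ≤ ch ∧ ch ≤ 'Z') := by intro hP; simp [isUb, hP] at h1
    have hP2 : ¬('a' ≤ ch ∧ ch ≤ 'z') := by intro hP; simp [isLb, hP] at h2
    have hP3 : ('0' ≤ ch ∧ ch ≤ '9') := by simpa [isDb] using h3
    rw [if_neg hP1, if_neg hP2, if_pos hP3, lastOcc_append, lastOcc_append, lastOcc_append,
      h1, h2, h3]
    simp
  · have hP1 : ¬('A' ≤ ch ∧ ch ≤ 'Z') := by intro hP; simp [isUb, hP] at h1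
    have hP2 : ¬('a' ≤ ch ∧ ch ≤ 'z') := by intro hP; simp [isLb, hP] at h2
    have hP3 : ¬('0' ≤ ch ∧ ch ≤ '9') := by intro hP; simp [isDb, hP] at h3
    rw [if_neg hP1, if_neg hP2, if_neg hP3, lastOcc_append, lastOcc_append, lastOcc_append,
      h1, h2, h3]
    simp

-- reductions of B's best update
lemma pvBestUpd_noneU (r : Nat) (x y : Option Nat) (b : Option Int) :
    pvBestUpd r none x y b = b := by cases x <;> cases y <;> rfl

lemma pvBestUpd_noneL (r : Nat) (u : Option Nat) (y : Option Nat) (b : Option Int) :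
    pvBestUpd r u none y b = b := by cases u <;> cases y <;> rfl

lemma pvBestUpd_noneD (r : Nat) (u x : Option Nat) (b : Option Int) :
    pvBestUpd r u x none b = b := by cases u <;> cases x <;> rfl

lemma pvBestUpd_some (r u l d : Nat) (b : Option Int) :
    pvBestUpd r (some u) (some l) (some d) b =
      if r ≥ 5 then pvMinOpt b (max ((r : Int) - ((min u (min l d) : Nat) : Int) + 1) 6)
      else b := by
  cases b with
  | none => rfl
  | some b0 =>
    simp only [pvBestUpd, pvMinOpt]
    split_ifs with h5 hlt
    · congr 1; omega
    · congr 1; omega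
    · rfl

-- main loop invariant: A's fold and B's fold stay in lock-step
lemma loop_eq (cs : List Char) :
    ∀ (rem p : List Char) (L : Nat) (bA : Option Int),
    cs = p ++ rem → L ≤ p.length →
    (0 < L → ∃ b, bA = some b ∧ b ≤ (p.length : Int) - (L : Int) + 1) →
    (pvLoopA cs rem p.length L (cnts (p.drop L)) bA).2.2 =
      pvLoopB rem p.length (lastOcc isUb p) (lastOcc isLb p) (lastOcc isDb p) bA := by
  intro rem
  induction rem with
  | nil => intro p L bA _ _ _; simp [pvLoopA, pvLoopB]
  | cons ch rest ih =>
    intro p L bA hcs hLp hbest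
    have hcs' : cs = (p ++ [ch]) ++ rest := by rw [hcs]; simp
    have hlen' : (p ++ [ch]).length = p.length + 1 := by simp
    have hdropL : (p ++ [ch]).drop L = p.drop L ++ [ch] := by
      rw [List.drop_append, show L - p.length = 0 by omega]; rfl
    simp only [pvLoopA, pvLoopB]
    rw [show (if catIdx ch ≥ 0 then pvBump (catIdx ch) 1 (cnts (p.drop L)) else cnts (p.drop L))
        = cnts ((p ++ [ch]).drop L) by rw [hdropL]; exact bump_cnts ch (p.drop L)]
    rw [last_step p ch]
    dsimp only
    have hweak : 0 < L → ∃ b, bA = some b ∧ b ≤ ((p ++ [ch]).length : Int) - (L : Int) + 1 := by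
      intro hL
      obtain ⟨b, hb, hble⟩ := hbest hL
      exact ⟨b, hb, by rw [hlen']; push_cast at hble ⊢; omega⟩
    rcases hu : lastOcc isUb (p ++ [ch]) with _ | u
    case none =>
      rw [pvBestUpd_noneU]
      have hstop : pvShrink cs p.length L (cnts ((p ++ [ch]).drop L)) bA
          = (L, cnts ((p ++ [ch]).drop L), bA) := by
        refine pvShrink_stop _ _ _ _ _ ?_
        rintro ⟨h6, h1, h2, h3⟩
        have hpos : 0 < ((p ++ [ch]).drop L).countP isUb := by
          simp only [cnts] at h1; exact_mod_cast h1
        obtain ⟨i, hi, _⟩ := (count_pos_iff isUb (p ++ [ch]) L (by simp <;> omega)).mp hpos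
        rw [hu] at hi; exact absurd hi (by simp)
      rw [hstop]
      have := ih (p ++ [ch]) L bA hcs' (by simp <;> omega) hweak
      rw [hlen', hu] at this
      exact this
    case some =>
    rcases hl : lastOcc isLb (p ++ [ch]) with _ | l
    case none =>
      rw [pvBestUpd_noneL]
      have hstop : pvShrink cs p.length L (cnts ((p ++ [ch]).drop L)) bA
          = (L, cnts ((p ++ [ch]).drop L), bA) := by
        refine pvShrink_stop _ _ _ _ _ ?_
        rintro ⟨h6, h1, h2, h3⟩
        have hpos : 0 < ((p ++ [ch]).drop L).countP isLb := by
          simp only [cnts] at h2; exact_mod_cast h2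
        obtain ⟨i, hi, _⟩ := (count_pos_iff isLb (p ++ [ch]) L (by simp <;> omega)).mp hpos
        rw [hl] at hi; exact absurd hi (by simp)
      rw [hstop]
      have := ih (p ++ [ch]) L bA hcs' (by simp <;> omega) hweak
      rw [hlen', hu, hl] at this
      exact this
    case some =>
    rcases hd : lastOcc isDb (p ++ [ch]) with _ | d
    case none =>
      rw [pvBestUpd_noneD]
      have hstop : pvShrink cs p.length L (cnts ((p ++ [ch]).drop L)) bA
          = (L, cnts ((p ++ [ch]).drop L), bA) := by
        refine pvShrink_stop _ _ _ _ _ ?_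
        rintro ⟨h6, h1, h2, h3⟩
        have hpos : 0 < ((p ++ [ch]).drop L).countP isDb := by
          simp only [cnts] at h3; exact_mod_cast h3
        obtain ⟨i, hi, _⟩ := (count_pos_iff isDb (p ++ [ch]) L (by simp <;> omega)).mp hpos
        rw [hd] at hi; exact absurd hi (by simp)
      rw [hstop]
      have := ih (p ++ [ch]) L bA hcs' (by simp <;> omega) hweak
      rw [hlen', hu, hl, hd] at this
      exact this
    case some =>
      rw [pvBestUpd_some]
      have huL := lastOcc_lt _ _ _ hu
      have hlL := lastOcc_lt _ _ _ hl
      have hdL := lastOcc_lt _ _ _ hd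
      rw [hlen'] at huL hlL hdL
      by_cases h5 : p.length ≥ 5
      · rw [if_pos h5]
        by_cases hLM : L ≤ min (min u (min l d)) (p.length - 5)
        · -- the shrink loop runs down to M + 1
          have hrun := pvShrink_run cs (p ++ [ch]) p.length u l d ⟨rest, hcs'⟩ hlen'
            hu hl hd h5 L bA hLM
          rw [hrun]
          dsimp only
          rw [show max ((p.length : Int) - ((min u (min l d) : Nat) : Int) + 1) 6
              = (p.length : Int) - ((min (min u (min l d)) (p.length - 5) : Nat) : Int) + 1 by
            omega]
          have := ih (p ++ [ch]) (min (min u (min l d)) (p.length - 5) + 1)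
            (pvMinOpt bA ((p.length : Int) -
              ((min (min u (min l d)) (p.length - 5) : Nat) : Int) + 1))
            hcs' (by simp)
            (fun _ => by
              cases bA with
              | none =>
                refine ⟨_, rfl, ?_⟩
                rw [hlen']; push_cast; omega
              | some b =>
                refine ⟨_, rfl, ?_⟩
                rw [hlen']
                have hmin : min b ((p.length : Int) -
                    ((min (min u (min l d)) (p.length - 5) : Nat) : Int) + 1)
                    ≤ (p.length : Int) -
                      ((min (min u (min l d)) (p.length - 5) : Nat) : Int) + 1 :=
                  min_le_right _ _
                push_cast at hmin ⊢; omega)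
          rw [hlen', hu, hl, hd] at this
          exact this
        · -- the shrink loop does not run; B's candidate cannot improve best
          have h0L : 0 < L := by omega
          obtain ⟨b, hb, hble⟩ := hbest h0L
          have hstop : pvShrink cs p.length L (cnts ((p ++ [ch]).drop L)) bA
              = (L, cnts ((p ++ [ch]).drop L), bA) := by
            refine pvShrink_stop _ _ _ _ _ ?_
            rintro ⟨h6, h1, h2, h3⟩
            have hpu : 0 < ((p ++ [ch]).drop L).countP isUb := by
              simp only [cnts] at h1; exact_mod_cast h1
            obtain ⟨i, hi, hiL⟩ := (count_pos_iff isUb (p ++ [ch]) L (by simp <;> omega)).mp hpu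
            rw [hu] at hi; injection hi with hi; subst hi
            have hpl : 0 < ((p ++ [ch]).drop L).countP isLb := by
              simp only [cnts] at h2; exact_mod_cast h2
            obtain ⟨j, hj, hjL⟩ := (count_pos_iff isLb (p ++ [ch]) L (by simp <;> omega)).mp hpl
            rw [hl] at hj; injection hj with hj; subst hj
            have hpd : 0 < ((p ++ [ch]).drop L).countP isDb := by
              simp only [cnts] at h3; exact_mod_cast h3
            obtain ⟨k, hk, hkL⟩ := (count_pos_iff isDb (p ++ [ch]) L (by simp <;> omega)).mp hpd
            rw [hd] at hk; injection hk with hk; subst hk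
            omega
          rw [hstop]
          have hbAeq : pvMinOpt bA
              (max ((p.length : Int) - ((min u (min l d) : Nat) : Int) + 1) 6) = bA := by
            rw [hb]
            simp only [pvMinOpt, Option.some.injEq]
            omega
          rw [hbAeq]
          have := ih (p ++ [ch]) L bA hcs' (by simp <;> omega) hweak
          rw [hlen', hu, hl, hd] at this
          exact this
      · rw [if_neg h5]
        have hstop : pvShrink cs p.length L (cnts ((p ++ [ch]).drop L)) bA
            = (L, cnts ((p ++ [ch]).drop L), bA) := by
          refine pvShrink_stop _ _ _ _ _ ?_
          rintro ⟨h6, _, _, _⟩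
          omega
        rw [hstop]
        have := ih (p ++ [ch]) L bA hcs' (by simp <;> omega) hweak
        rw [hlen', hu, hl, hd] at this
        exact this

-- ===== VERDICT (by name: the statement is the Claim_ definition above) =====
theorem shortest_valid_substring_len_spec : Claim_equal_shortest_valid_substring_len := by
  intro s _
  unfold Spec_shortest_valid_substring_len shortest_valid_substring_len shortest_valid_substring_len_alt
  by_cases h : s.length < 6
  · simp [h]
  · have hL := loop_eq s.toList s.toList [] 0 none (by simp) (by simp) (by omega)
    simp only [List.length_nil, List.drop_nil] at hL
    simp [h, cnts, lastOcc, lastOccFrom] at hL ⊢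
    rw [hL]
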